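-- pv_equiv track=rewrite | github.com/yuricarrascotrinidad/Soc-Monitoring | app/utils/helpers.py | filtrar_eventos_generales
-- ===== SOURCE A (Python) =====
-- def filtrar_eventos_generales(eventos, reglas):
--     if not eventos:
--         return []
--
--     eventos_filtrados = []
--     for e in eventos:
--         es_subconjunto = False
--         reps_e = reglas.get(e, set())
--
--         for e2 in eventos:
--             if e == e2:
--                 continue
--
--             reps_e2 = reglas.get(e2, set())
--             if reps_e.issubset(reps_e2):
--                 if len(reps_e) < len(reps_e2):
--                     es_subconjunto = True
--                     break
--
--         if not es_subconjunto:
--             eventos_filtrados.append(e)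
--
--     return eventos_filtrados
-- ===== SOURCE B (Python) =====
-- def filtrar_eventos_generales(eventos, reglas):
--     # Keep events whose ruleset is maximal under strict set inclusion.
--     pares = [(e, reglas.get(e, set())) for e in eventos]
--     maximal = []
--     for _, s in sorted(pares, key=lambda p: len(p[1]), reverse=True):
--         if not any(s < m for m in maximal):
--             maximal.append(s)
--     return [e for e, s in pares if any(s == m for m in maximal)]
-- ===== Notes on version B (the rewrite author's own statement) =====
-- stated objective: faster
-- what changed: A tests every event against every other event with a strict-subset scan; B sorts the (event, ruleset) pairs by decreasing ruleset size once, builds the list of maximal rulesets in a single scan (a set is dropped iff it is a strict subset of an already-seen, necessarily larger set), then keeps in original order the events whose ruleset is one of the maximal ones.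
import Mathlib
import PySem

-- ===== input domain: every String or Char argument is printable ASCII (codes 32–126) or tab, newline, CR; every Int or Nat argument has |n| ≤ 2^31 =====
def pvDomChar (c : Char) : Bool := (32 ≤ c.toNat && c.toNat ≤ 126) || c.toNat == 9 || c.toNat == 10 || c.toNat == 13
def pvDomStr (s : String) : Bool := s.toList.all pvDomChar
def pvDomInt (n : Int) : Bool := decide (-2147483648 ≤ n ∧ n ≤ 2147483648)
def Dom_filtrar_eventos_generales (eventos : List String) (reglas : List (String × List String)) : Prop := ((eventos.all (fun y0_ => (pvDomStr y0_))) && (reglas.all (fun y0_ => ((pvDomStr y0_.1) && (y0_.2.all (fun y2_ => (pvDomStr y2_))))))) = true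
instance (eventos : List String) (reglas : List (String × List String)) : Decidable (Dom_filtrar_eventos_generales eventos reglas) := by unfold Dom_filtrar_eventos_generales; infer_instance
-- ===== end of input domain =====

-- B replaces A's all-pairs strict-subset test by a sort-by-decreasing-size scan that
-- maintains the maximal rulesets, then keeps (in input order) the events whose ruleset
-- is one of them (objective: faster, measured).

-- ===== PORT A =====
-- reglas.get(e, set()): the stored value is a Python set, built here from its element list
def pvConjuntoA (reglas : List (String × List String)) (e : String) : PySem.Set String :=
  PySem.Set.ofList ((PySem.Dict.ofList reglas).getD e [])

-- A's inner 'for e2 in eventos' loop with its break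
def pvEsSubconjunto (reps_e : PySem.Set String) (e : String)
    (reglas : List (String × List String)) : List String → Bool
  | [] => false
  | e2 :: rest =>
    if e == e2 then pvEsSubconjunto reps_e e reglas rest
    else
      let reps_e2 := pvConjuntoA reglas e2
      if PySem.Set.issubset reps_e reps_e2 && decide (PySem.Set.len reps_e < PySem.Set.len reps_e2)
      then true
      else pvEsSubconjunto reps_e e reglas rest

def filtrar_eventos_generales (eventos : List String) (reglas : List (String × List String)) : List String :=
  if eventos = [] then []
  else eventos.foldl (fun acc e =>
    if !(pvEsSubconjunto (pvConjuntoA reglas e) e reglas eventos) then acc ++ [e] else acc) []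

-- ===== PORT B =====
def pvConjuntoB (reglas : List (String × List String)) (e : String) : PySem.Set String :=
  PySem.Set.ofList ((PySem.Dict.ofList reglas).getD e [])

-- Python's strict subset s < m on sets: subset and strictly smaller
def pvEstricto (s t : PySem.Set String) : Bool :=
  PySem.Set.issubset s t && decide (PySem.Set.len s < PySem.Set.len t)

def filtrar_eventos_generales_alt (eventos : List String) (reglas : List (String × List String)) : List String :=
  let pares := eventos.map (fun e => (e, pvConjuntoB reglas e))
  let maximal := (PySem.List.sorted pares (fun p => p.2.length) true).foldl
    (fun acc p => if acc.any (fun m => pvEstricto p.2 m) then acc else acc ++ [p.2]) []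
  (pares.filter (fun p => maximal.any (fun m => PySem.Set.equal p.2 m))).map (fun p => p.1)

-- ===== PRECONDITION & SPEC =====
def Spec_filtrar_eventos_generales (eventos : List String) (reglas : List (String × List String)) (out : List String) : Prop := out = filtrar_eventos_generales_alt eventos reglas
instance (eventos : List String) (reglas : List (String × List String)) (out : List String) : Decidable (Spec_filtrar_eventos_generales eventos reglas out) := by unfold Spec_filtrar_eventos_generales; infer_instance

-- ===== CLAIM (what is proved, stated in full; the proofs are below) =====
def Claim_equal_filtrar_eventos_generales : Prop := ∀ (eventos : List String) (reglas : List (String × List String)), Dom_filtrar_eventos_generales eventos reglas → Spec_filtrar_eventos_generales eventos reglas (filtrar_eventos_generales eventos reglas)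

-- ===== LEMMAS AND PROOFS =====

theorem pvEstricto_self (s : PySem.Set String) : pvEstricto s s = false := by
  simp [pvEstricto]

theorem pvEstricto_false_of_le (s t : PySem.Set String) (h : t.length ≤ s.length) :
    pvEstricto s t = false := by
  simp only [pvEstricto, PySem.Set.len, Bool.and_eq_false_iff, decide_eq_false_iff_not]
  right; omega

theorem pvEstricto_trans (a b c : PySem.Set String)
    (h1 : pvEstricto a b = true) (h2 : pvEstricto b c = true) : pvEstricto a c = true := by
  simp only [pvEstricto, PySem.Set.len, Bool.and_eq_true, decide_eq_true_iff,
    PySem.Set.issubset_iff] at *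
  exact ⟨fun x hx => h2.1 x (h1.1 x hx), by omega⟩

-- A's inner loop is the existence of a strict superset among all events
theorem pvEsSubconjunto_eq (reps : PySem.Set String) (e : String)
    (reglas : List (String × List String)) (hreps : reps = pvConjuntoA reglas e) :
    ∀ l : List String, pvEsSubconjunto reps e reglas l
      = l.any (fun e2 => pvEstricto reps (pvConjuntoA reglas e2)) := by
  intro l
  induction l with
  | nil => simp [pvEsSubconjunto]
  | cons e2 rest ih =>
    by_cases h : e = e2
    · subst h
      simp [pvEsSubconjunto, ih, ← hreps, pvEstricto_self]
    · have hne : (e == e2) = false := by simp [h]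
      have hids : pvEstricto reps (pvConjuntoA reglas e2)
          = (PySem.Set.issubset reps (pvConjuntoA reglas e2)
             && decide (PySem.Set.len reps < PySem.Set.len (pvConjuntoA reglas e2))) := rfl
      simp only [pvEsSubconjunto, hne, Bool.false_eq_true, if_false, List.any_cons, ← ih, ← hids]
      cases pvEstricto reps (pvConjuntoA reglas e2) <;> simp

-- the step of B's maximal-rulesets scan
def pvStep (acc : List (PySem.Set String)) (s : PySem.Set String) : List (PySem.Set String) :=
  if acc.any (fun m => pvEstricto s m) then acc else acc ++ [s]

theorem mem_foldl_pvStep (vs : List (PySem.Set String)) :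
    ∀ acc, ∀ m ∈ vs.foldl pvStep acc, m ∈ acc ∨ m ∈ vs := by
  induction vs with
  | nil => intro acc m hm; exact Or.inl hm
  | cons s rest ih =>
    intro acc m hm
    rcases ih (pvStep acc s) m hm with h | h
    · unfold pvStep at h
      split at h
      · exact Or.inl h
      · rcases List.mem_append.mp h with h' | h'
        · exact Or.inl h'
        · simp at h'; subst h'; exact Or.inr (by simp)
    · exact Or.inr (List.mem_cons_of_mem _ h)

theorem subset_foldl_pvStep (vs : List (PySem.Set String)) :
    ∀ acc, ∀ m ∈ acc, m ∈ vs.foldl pvStep acc := by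
  induction vs with
  | nil => intro acc m hm; exact hm
  | cons s rest ih =>
    intro acc m hm
    apply ih
    unfold pvStep
    split
    · exact hm
    · exact List.mem_append.mpr (Or.inl hm)

-- every processed ruleset is equal to, or strictly below, a member of the final list
theorem cover_foldl_pvStep (vs : List (PySem.Set String)) :
    ∀ acc, ∀ s ∈ vs, ∃ m ∈ vs.foldl pvStep acc, pvEstricto s m = true ∨ s = m := by
  induction vs with
  | nil => intro acc s hs; cases hs
  | cons s0 rest ih =>
    intro acc s hs
    rw [List.foldl_cons]
    rcases List.mem_cons.mp hs with h | h
    · subst h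
      by_cases hc : acc.any (fun m => pvEstricto s m) = true
      · rcases List.any_eq_true.mp hc with ⟨m, hm, hpm⟩
        refine ⟨m, ?_, Or.inl hpm⟩
        have : m ∈ pvStep acc s := by unfold pvStep; split <;> simp [hm]
        exact subset_foldl_pvStep rest _ m this
      · refine ⟨s, ?_, Or.inr rfl⟩
        apply subset_foldl_pvStep rest (pvStep acc s)
        unfold pvStep
        simp [hc]
    · exact ih (pvStep acc s0) s h

-- no member of the final list is strictly below another member
theorem antichain_foldl_pvStep (vs : List (PySem.Set String)) :
    ∀ acc, vs.Pairwise (fun a b => b.length ≤ a.length) →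
      (∀ m1 ∈ acc, ∀ m2 ∈ acc, pvEstricto m1 m2 = false) →
      (∀ s ∈ vs, ∀ a ∈ acc, s.length ≤ a.length) →
      ∀ m1 ∈ vs.foldl pvStep acc, ∀ m2 ∈ vs.foldl pvStep acc, pvEstricto m1 m2 = false := by
  induction vs with
  | nil => intro acc _ h1 _ m1 hm1 m2 hm2; exact h1 m1 hm1 m2 hm2
  | cons s rest ih =>
    intro acc hsort h1 h2 m1 hm1 m2 hm2
    simp only [List.foldl_cons] at hm1 hm2
    have hsort' := (List.pairwise_cons.mp hsort).2
    have hhead := (List.pairwise_cons.mp hsort).1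
    by_cases hc : acc.any (fun m => pvEstricto s m) = true
    · have hstep : pvStep acc s = acc := by unfold pvStep; simp [hc]
      rw [hstep] at hm1 hm2
      exact ih acc hsort' h1 (fun t ht a ha => h2 t (List.mem_cons_of_mem _ ht) a ha) m1 hm1 m2 hm2
    · have hstep : pvStep acc s = acc ++ [s] := by unfold pvStep; simp [hc]
      rw [hstep] at hm1 hm2
      have hacc : acc.any (fun m => pvEstricto s m) = false := by simpa using hc
      have hcf := List.any_eq_false.mp hacc
      refine ih (acc ++ [s]) hsort' ?_ ?_ m1 hm1 m2 hm2
      · intro a ha b hb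
        rcases List.mem_append.mp ha with ha' | ha' <;> rcases List.mem_append.mp hb with hb' | hb'
        · exact h1 a ha' b hb'
        · simp at hb'; subst hb'
          exact pvEstricto_false_of_le a b (h2 b (List.mem_cons_self) a ha')
        · simp at ha'; subst ha'
          simpa using hcf b hb'
        · simp at ha' hb'; subst ha'; subst hb'
          exact pvEstricto_self _
      · intro t ht a ha
        rcases List.mem_append.mp ha with ha' | ha'
        · exact h2 t (List.mem_cons_of_mem _ ht) a ha'
        · simp at ha'; subst ha'
          exact hhead t ht

-- a nonempty list of rulesets has a length-maximal member
theorem exists_len_max (l : List (PySem.Set String)) (h : l ≠ []) :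
    ∃ t ∈ l, ∀ u ∈ l, u.length ≤ t.length := by
  induction l with
  | nil => exact absurd rfl h
  | cons x rest ih =>
    rcases List.eq_nil_or_concat rest with h' | _
    · subst h'; exact ⟨x, by simp⟩
    · rcases rest with _ | ⟨y, rest'⟩
      · exact ⟨x, by simp⟩
      · rcases ih (by simp) with ⟨t, ht, hmax⟩
        by_cases hx : x.length ≤ t.length
        · exact ⟨t, List.mem_cons_of_mem _ ht, by
            intro u hu
            rcases List.mem_cons.mp hu with h' | h'
            · subst h'; exact hx
            · exact hmax u h'⟩
        · exact ⟨x, List.mem_cons_self, by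
            intro u hu
            rcases List.mem_cons.mp hu with h' | h'
            · subst h'; omega
            · exact le_trans (hmax u h') (by omega)⟩

-- a member of the final list is not strictly below ANY processed ruleset
theorem maximal_foldl_pvStep (vs : List (PySem.Set String))
    (hsort : vs.Pairwise (fun a b => b.length ≤ a.length)) :
    ∀ m ∈ vs.foldl pvStep [], ∀ s ∈ vs, pvEstricto m s = false := by
  intro m hm s hsv
  by_contra hms
  have hms : pvEstricto m s = true := by simpa using hms
  -- pick a length-maximal strict superset of m among vs
  have hF : vs.filter (fun u => pvEstricto m u) ≠ [] := by
    intro hnil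
    have : s ∈ vs.filter (fun u => pvEstricto m u) := List.mem_filter.mpr ⟨hsv, hms⟩
    rw [hnil] at this; cases this
  rcases exists_len_max _ hF with ⟨t, htF, htmax⟩
  have ht : t ∈ vs := (List.mem_filter.mp htF).1
  have hmt : pvEstricto m t = true := by simpa using (List.mem_filter.mp htF).2
  rcases cover_foldl_pvStep vs [] t ht with ⟨m', hm', hcase⟩
  rcases hcase with hlt | heq
  · -- t is strictly below m' ∈ vs: contradicts t's length-maximality
    have hm'v : m' ∈ vs := by
      rcases mem_foldl_pvStep vs [] m' hm' with h | h
      · cases h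
      · exact h
    have : m' ∈ vs.filter (fun u => pvEstricto m u) :=
      List.mem_filter.mpr ⟨hm'v, by simpa using pvEstricto_trans m t m' hmt hlt⟩
    have hle := htmax m' this
    have := (Bool.and_eq_true _ _).mp hlt
    simp only [PySem.Set.len, decide_eq_true_iff] at this
    omega
  · -- t itself is in the final list: contradicts the antichain property
    subst heq
    have := antichain_foldl_pvStep vs [] hsort (by simp) (by simp) m hm t hm'
    rw [hmt] at this; cases this

-- per-element characterisation of B's keep test
theorem keep_iff (vs : List (PySem.Set String))
    (hsort : vs.Pairwise (fun a b => b.length ≤ a.length))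
    (hnd : ∀ s ∈ vs, s.Nodup)
    (x : PySem.Set String) (hx : x ∈ vs) :
    (vs.foldl pvStep []).any (fun m => PySem.Set.equal x m)
      = !(vs.any (fun s => pvEstricto x s)) := by
  cases hb : vs.any (fun s => pvEstricto x s) with
  | false =>
    -- x is maximal: cover gives an equal member
    rcases cover_foldl_pvStep vs [] x hx with ⟨m, hm, hcase⟩
    rcases hcase with hlt | heq
    · exfalso
      have hmv : m ∈ vs := by
        rcases mem_foldl_pvStep vs [] m hm with h | h
        · cases h
        · exact h
      exact (List.any_eq_false.mp hb m hmv) hlt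
    · subst heq
      simp only [Bool.not_false]
      exact List.any_eq_true.mpr ⟨x, hm, by simp [PySem.Set.equal_iff]⟩
  | true =>
    -- x is dominated: no member of the final list equals x
    simp only [Bool.not_true]
    apply List.any_eq_false.mpr
    intro m hm hequal
    rcases List.any_eq_true.mp hb with ⟨s, hsv, hxs⟩
    have hmv : m ∈ vs := by
      rcases mem_foldl_pvStep vs [] m hm with h | h
      · cases h
      · exact h
    -- x and m have the same members and (being Nodup) the same length
    have hequal' : PySem.Set.equal x m = true := hequal
    have hmem := (PySem.Set.equal_iff x m).mp hequal'
    have hlen : x.length = m.length :=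
      (List.perm_ext_iff_of_nodup (hnd x hx) (hnd m hmv)|>.mpr hmem).length_eq
    have hms : pvEstricto m s = true := by
      have := (Bool.and_eq_true _ _).mp hxs
      simp only [PySem.Set.issubset_iff, PySem.Set.len, decide_eq_true_iff] at this
      simp only [pvEstricto, Bool.and_eq_true, PySem.Set.issubset_iff, PySem.Set.len,
        decide_eq_true_iff]
      exact ⟨fun y hy => this.1 y ((hmem y).mpr hy), by omega⟩
    have := maximal_foldl_pvStep vs hsort m hm s hsv
    rw [hms] at this; cases this

theorem filtrar_eventos_generales_eq_filter (eventos : List String)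
    (reglas : List (String × List String)) :
    filtrar_eventos_generales eventos reglas
      = eventos.filter (fun e =>
          !(eventos.any (fun e2 =>
            pvEstricto (pvConjuntoB reglas e) (pvConjuntoB reglas e2)))) := by
  unfold filtrar_eventos_generales
  split
  · rename_i h; subst h; rfl
  · have := PySem.List.foldl_append_if
      (fun e => !(pvEsSubconjunto (pvConjuntoA reglas e) e reglas eventos))
      (fun e => e) eventos []
    rw [this]
    simp only [List.nil_append, List.map_id']
    apply List.filter_congr
    intro e _
    rw [pvEsSubconjunto_eq (pvConjuntoA reglas e) e reglas rfl eventos]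
    rfl

theorem filtrar_eventos_generales_alt_eq_filter (eventos : List String)
    (reglas : List (String × List String)) :
    filtrar_eventos_generales_alt eventos reglas
      = eventos.filter (fun e =>
          !(eventos.any (fun e2 =>
            pvEstricto (pvConjuntoB reglas e) (pvConjuntoB reglas e2)))) := by
  unfold filtrar_eventos_generales_alt
  simp only []
  set g := pvConjuntoB reglas with hg
  set pares := eventos.map (fun e => (e, g e)) with hpares
  set vs := (PySem.List.sorted pares (fun p => p.2.length) true).map (fun p => p.2) with hvs
  have hfold : (PySem.List.sorted pares (fun p => p.2.length) true).foldl
      (fun acc p => if acc.any (fun m => pvEstricto p.2 m) then acc else acc ++ [p.2]) []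
      = vs.foldl pvStep [] := by
    rw [hvs, List.foldl_map]
    rfl
  rw [hfold]
  -- membership of vs: exactly the rulesets of the events
  have hmemvs : ∀ s, s ∈ vs ↔ ∃ e2 ∈ eventos, s = g e2 := by
    intro s
    rw [hvs]
    constructor
    · intro hs
      rcases List.mem_map.mp hs with ⟨p, hp, rfl⟩
      rw [PySem.List.mem_sorted, hpares] at hp
      rcases List.mem_map.mp hp with ⟨e2, he2, rfl⟩
      exact ⟨e2, he2, rfl⟩
    · rintro ⟨e2, he2, rfl⟩
      exact List.mem_map.mpr ⟨(e2, g e2),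
        (PySem.List.mem_sorted _ _ _ _).mpr (hpares ▸ List.mem_map.mpr ⟨e2, he2, rfl⟩), rfl⟩
  have hsort : vs.Pairwise (fun a b => b.length ≤ a.length) := by
    rw [hvs, List.pairwise_map]
    exact PySem.List.sorted_pairwise_rev pares (fun p => p.2.length)
  have hnd : ∀ s ∈ vs, s.Nodup := by
    intro s hs
    rcases (hmemvs s).mp hs with ⟨e2, _, rfl⟩
    exact PySem.Set.nodup_ofList _
  have hany : ∀ x : PySem.Set String,
      vs.any (fun s => pvEstricto x s) = eventos.any (fun e2 => pvEstricto x (g e2)) := by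
    intro x
    cases h : eventos.any (fun e2 => pvEstricto x (g e2)) with
    | false =>
      apply List.any_eq_false.mpr
      intro s hs
      rcases (hmemvs s).mp hs with ⟨e2, he2, rfl⟩
      exact List.any_eq_false.mp h e2 he2
    | true =>
      rcases List.any_eq_true.mp h with ⟨e2, he2, hp⟩
      exact List.any_eq_true.mpr ⟨g e2, (hmemvs _).mpr ⟨e2, he2, rfl⟩, hp⟩
  -- collapse the pair bookkeeping to a filter over eventos
  rw [hpares, List.filter_map, List.map_map]
  have hcomp : ∀ e ∈ eventos,
      ((fun p : String × PySem.Set String =>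
          (vs.foldl pvStep []).any (fun m => PySem.Set.equal p.2 m)) ∘ fun e => (e, g e)) e
        = (fun e => !(eventos.any (fun e2 => pvEstricto (g e) (g e2)))) e := by
    intro e he
    simp only [Function.comp]
    rw [keep_iff vs hsort hnd (g e) ((hmemvs _).mpr ⟨e, he, rfl⟩), hany]
  rw [List.filter_congr hcomp]
  exact List.map_id _

-- ===== VERDICT (by name: the statement is the Claim_ definition above) =====
theorem filtrar_eventos_generales_spec : Claim_equal_filtrar_eventos_generales := by
  intro eventos reglas _
  unfold Spec_filtrar_eventos_generales
  rw [filtrar_eventos_generales_eq_filter, filtrar_eventos_generales_alt_eq_filter]
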